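-- pv_equiv track=rewrite | github.com/MrBrantCode/unitest_baseline | mut_generate/mist_train_cf/cf_44440/solution.py | locate_sequence
-- ===== SOURCE A (Python) =====
-- def locate_sequence(T, q):
--     words = T.split()
--     first_pos = -1
--     count = 0
--     dict_positions = {}
--
--     for word in words:
--         idx = word.find(q)
--         if idx != -1:
--             if first_pos == -1:
--                 first_pos = idx
--             count += 1
--             if idx in dict_positions:
--                 dict_positions[idx].append(word)
--             else:
--                 dict_positions[idx] = [word]
--
--     return first_pos, count, dict_positions
-- ===== SOURCE B (Python) =====
-- def locate_sequence(T, q):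
--     words = T.split()
--     hits = [w.find(q) for w in words]
--     count = sum(1 for i in hits if i != -1)
--     first_pos = next((i for i in hits if i != -1), -1)
--     keys = []
--     for i in hits:
--         if i != -1 and i not in keys:
--             keys.append(i)
--     dict_positions = {k: [w for w, i in zip(words, hits) if i == k] for k in keys}
--     return first_pos, count, dict_positions
-- ===== Notes on version B (the rewrite author's own statement) =====
-- stated objective: alternative
-- what changed: Instead of one stateful loop threading (first_pos, count, dict) and mutating the dict word-by-word, B precomputes the find index of every word, reads count and first_pos off that index list, collects the distinct match positions in first-appearance order, and builds the result dict per-key by scanning the (word, index) pairs for each key.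
import Mathlib
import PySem

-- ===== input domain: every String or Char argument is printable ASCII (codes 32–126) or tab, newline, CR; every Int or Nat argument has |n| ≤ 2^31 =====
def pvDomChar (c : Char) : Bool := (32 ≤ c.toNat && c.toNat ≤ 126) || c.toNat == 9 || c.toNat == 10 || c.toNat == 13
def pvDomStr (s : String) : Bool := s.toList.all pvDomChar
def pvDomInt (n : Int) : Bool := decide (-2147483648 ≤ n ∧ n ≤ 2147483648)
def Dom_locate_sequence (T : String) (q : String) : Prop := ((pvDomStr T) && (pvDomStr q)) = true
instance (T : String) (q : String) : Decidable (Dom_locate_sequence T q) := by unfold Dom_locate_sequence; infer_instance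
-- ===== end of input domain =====

-- B replaces A's single stateful loop (threading first_pos, count and a mutated dict) by staged
-- passes over a precomputed index list, with the dict built per distinct key; alternative decomposition.

-- ===== PORT A =====
def locate_sequence (T : String) (q : String) : Int × Int × (List (Int × List String)) :=
  let words := PySem.Str.split₀ T
  let res := words.foldl (fun (st : Int × Int × PySem.Dict Int (List String)) word =>
      let idx := PySem.Str.find word q
      if idx ≠ -1 then
        let fp := if st.1 = -1 then idx else st.1
        let d := if st.2.2.contains idx then st.2.2.modify idx [] (· ++ [word])
                 else st.2.2.insert idx [word]
        (fp, st.2.1 + 1, d)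
      else st) (-1, 0, PySem.Dict.empty)
  (res.1, res.2.1, res.2.2.items)

-- ===== PORT B =====
def locate_sequence_alt (T : String) (q : String) : Int × Int × (List (Int × List String)) :=
  let words := PySem.Str.split₀ T
  let hits := words.map (fun w => PySem.Str.find w q)
  let count : Int := hits.foldl (fun c i => if i ≠ -1 then c + 1 else c) 0
  let first_pos : Int := (hits.find? (fun i => i != -1)).getD (-1)
  let keys : List Int := hits.foldl (fun ks i => if i ≠ -1 ∧ i ∉ ks then ks ++ [i] else ks) []
  let dict_positions := keys.map (fun k =>
      (k, ((words.zip hits).filter (fun p => p.2 == k)).map (·.1)))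
  (first_pos, count, dict_positions)

-- ===== PRECONDITION & SPEC =====
def Spec_locate_sequence (T : String) (q : String) (out : Int × Int × (List (Int × List String))) : Prop := out = locate_sequence_alt T q
instance (T : String) (q : String) (out : Int × Int × (List (Int × List String))) : Decidable (Spec_locate_sequence T q out) := by unfold Spec_locate_sequence; infer_instance

-- ===== CLAIM (what is proved, stated in full; the proofs are below) =====
def Claim_equal_locate_sequence : Prop := ∀ (T : String) (q : String), Dom_locate_sequence T q → Spec_locate_sequence T q (locate_sequence T q)

-- ===== LEMMAS AND PROOFS =====

-- A's contains/append-or-insert branch is exactly d[k] = d.get(k, []) + [w] (PySem.Dict.modify).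
theorem branch_eq_modify (d : PySem.Dict Int (List String)) (i : Int) (w : String) :
    (if d.contains i then d.modify i [] (· ++ [w]) else d.insert i [w])
      = d.modify i [] (· ++ [w]) := by
  by_cases h : d.contains i = true
  · simp [h]
  · simp only [Bool.not_eq_true] at h
    simp only [h]
    have h2 : d.get? i = none := by
      rw [← Bool.not_eq_true, PySem.Dict.contains_eq_isSome_get?] at h
      cases hg : d.get? i with
      | none => rfl
      | some v => simp [hg] at h
    simp [PySem.Dict.modify, PySem.Dict.getD, h2]

-- A's loop, rephrased over the materialized (idx, word) match list.
theorem main_lemma (q : String) (ws : List String) (fp cnt : Int)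
    (d : PySem.Dict Int (List String)) :
    ws.foldl (fun (st : Int × Int × PySem.Dict Int (List String)) word =>
      let idx := PySem.Str.find word q
      if idx = -1 then st
      else
        ((if st.1 = -1 then idx else st.1), st.2.1 + 1,
          if st.2.2.contains idx then st.2.2.modify idx [] (· ++ [word])
          else st.2.2.insert idx [word])) (fp, cnt, d)
    = (let ps := ws.filterMap (fun w =>
          let i := PySem.Str.find w q
          if i = -1 then none else some (i, w));
       ((if fp = -1 then (ps.map Prod.fst).headD (-1) else fp),
        cnt + (ps.length : Int),
        ps.foldl (fun d (p : Int × String) => d.modify p.1 [] (· ++ [p.2])) d)) := by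
  induction ws generalizing fp cnt d with
  | nil => simp
  | cons w ws ih =>
    by_cases hi : PySem.Str.find w q = -1
    · simp only [List.foldl_cons, List.filterMap_cons, hi, ite_true]
      exact ih fp cnt d
    · simp only [List.foldl_cons, List.filterMap_cons, if_neg hi]
      rw [ih, branch_eq_modify]
      rw [PySem.Str.find_eq] at hi
      by_cases hfp : fp = -1
      · simp [hfp, hi]
        omega
      · simp [hfp]
        omega

-- the first indices of the match list are exactly the non-(-1) entries of the index list, in order
theorem pairs_map_fst (f : String → Int) (ws : List String) :
    (ws.filterMap (fun w => if f w = -1 then none else some (f w, w))).map Prod.fst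
      = (ws.map f).filter (fun i => decide (¬ i = -1)) := by
  induction ws with
  | nil => simp
  | cons w ws ih =>
    by_cases hi : f w = -1 <;> simp [hi, ih]

-- B's count pass counts the matches
theorem count_lemma (xs : List Int) (c : Int) :
    xs.foldl (fun c i => if i = -1 then c else c + 1) c
      = c + (((xs.filter (fun i => decide (¬ i = -1))).length : Int)) := by
  induction xs generalizing c with
  | nil => simp
  | cons x xs ih =>
    simp only [List.foldl_cons, List.filter_cons]
    by_cases hx : x = -1
    · simpa [hx] using ih c
    · rw [if_neg hx, ih (c + 1)]
      simp [hx]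
      ring

-- B's first_pos pass reads the head of the filtered index list
theorem first_lemma (xs : List Int) :
    (xs.find? (fun i => i != -1)).getD (-1)
      = (xs.filter (fun i => decide (¬ i = -1))).headD (-1) := by
  induction xs with
  | nil => simp
  | cons x xs ih =>
    simp only [List.find?_cons, List.filter_cons]
    by_cases hx : x = -1
    · simpa [hx] using ih
    · have hb : (x != -1) = true := by simp [hx]
      simp [hb, hx]

-- B's keys loop is the ordered dedup of the matched indices (a PySem.Set built over the filtered list)
theorem keys_lemma (xs : List Int) (acc : PySem.Set Int) :
    xs.foldl (fun ks i => if ¬ i = -1 ∧ i ∉ ks then ks ++ [i] else ks) acc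
      = (xs.filter (fun i => decide (¬ i = -1))).foldl PySem.Set.add acc := by
  induction xs generalizing acc with
  | nil => rfl
  | cons x xs ih =>
    simp only [List.foldl_cons, List.filter_cons]
    by_cases hx : x = -1
    · simpa [hx] using ih acc
    · rw [if_pos (show decide (¬ x = -1) = true by simp [hx]), List.foldl_cons]
      by_cases hm : x ∈ acc
      · rw [if_neg (fun h => h.2 hm), PySem.Set.add_of_mem hm]
        exact ih acc
      · rw [if_pos ⟨hx, hm⟩, PySem.Set.add_of_not_mem hm]
        exact ih (acc ++ [x])

-- a dict with nodup keys is the list of its (key, getD key) pairs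
theorem items_eq_keys_map (d : PySem.Dict Int (List String)) (h : d.keys.Nodup) :
    d.items = d.keys.map (fun k => (k, d.getD k [])) := by
  have h1 : d.keys.map (fun k => (k, d.getD k []))
      = d.items.map (fun p => (p.1, d.getD p.1 [])) := by
    simp only [PySem.Dict.keys, List.map_map]; rfl
  have h2 : ∀ p ∈ d.items, (fun (p : Int × List String) => (p.1, d.getD p.1 [])) p = p := by
    intro p hp
    have := PySem.Dict.getD_of_mem_items (d := d) (d0 := []) (by simpa using hp) h
    simp [this]
  rw [h1, List.map_congr_left h2]
  simp

-- value group of a key k ≠ -1: filtering the match list equals B's per-key scan of (word, index) pairs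
theorem group_lemma (f : String → Int) (ws : List String) (k : Int) (hk : k ≠ -1) :
    ((ws.filterMap (fun w => if f w = -1 then none else some (f w, w))).filter
        (fun p => p.1 == k)).map (·.2)
      = ((ws.zip (ws.map f)).filter (fun p => p.2 == k)).map (·.1) := by
  induction ws with
  | nil => simp
  | cons w ws ih =>
    have hnk : ¬ ((-1 : Int) = k) := fun h => hk h.symm
    by_cases hi : f w = -1
    · simp [hi, hnk, ih]
    · by_cases he : f w = k
      · simp [he, hk, ih]
      · simp [hi, he, ih]

-- ===== VERDICT (by name: the statement is the Claim_ definition above) =====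
theorem locate_sequence_spec : Claim_equal_locate_sequence := by
  intro T q _
  show locate_sequence T q = locate_sequence_alt T q
  unfold locate_sequence locate_sequence_alt
  simp only [ne_eq, ite_not]
  rw [main_lemma q (PySem.Str.split₀ T) (-1) 0 PySem.Dict.empty]
  simp only []
  set ws := PySem.Str.split₀ T with hws
  set f : String → Int := fun w => PySem.Str.find w q with hf
  have hlet : (fun w => let i := PySem.Str.find w q; if i = -1 then none else some (i, w))
      = (fun w => if f w = -1 then none else some (f w, w)) := rfl
  rw [hlet]
  set ps := ws.filterMap (fun w => if f w = -1 then none else some (f w, w)) with hps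
  set D := ps.foldl (fun d (p : Int × String) => d.modify p.1 [] (· ++ [p.2])) PySem.Dict.empty with hD
  have hmf : (ws.map f).filter (fun i => decide (¬ i = -1)) = ps.map Prod.fst :=
    (pairs_map_fst f ws).symm
  have hkeysD : D.keys = PySem.Set.ofList (ps.map Prod.fst) := by
    rw [hD, PySem.Dict.keys_foldl_modify_key (key := Prod.fst)]
    simp [PySem.Set.update, PySem.Set.ofList_eq_foldl]
  have hnodup : D.keys.Nodup := by
    rw [hkeysD]; exact PySem.Set.nodup_ofList _
  have hkeyne : ∀ k ∈ D.keys, k ≠ -1 := by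
    intro k hk
    rw [hkeysD, PySem.Set.mem_ofList, List.mem_map] at hk
    obtain ⟨p, hp, hpk⟩ := hk
    rw [hps, List.mem_filterMap] at hp
    obtain ⟨w, _, hw⟩ := hp
    by_cases hi : f w = -1
    · simp [hi] at hw
    · rw [if_neg hi] at hw
      cases hw
      exact hpk ▸ hi
  clear_value ws f ps D
  have h1 : (if (-1 : Int) = -1 then ((ps.map Prod.fst).headD (-1)) else -1)
      = (List.find? (fun i => i != -1) (List.map f ws)).getD (-1) := by
    have hfirst := first_lemma (List.map f ws)
    rw [hmf] at hfirst
    rw [if_pos rfl, hfirst]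
  have h2 : 0 + (ps.length : Int)
      = (List.map f ws).foldl (fun c i => if i = -1 then c else c + 1) 0 := by
    rw [count_lemma, hmf]
    simp
  have h3 : D.items
      = (List.foldl (fun ks i => if ¬ i = -1 ∧ i ∉ ks then ks ++ [i] else ks) []
          (List.map f ws)).map
          (fun k => (k, ((ws.zip (List.map f ws)).filter (fun p => p.2 == k)).map (·.1))) := by
    rw [items_eq_keys_map D hnodup, keys_lemma, ← PySem.Set.ofList_eq_foldl, hmf, ← hkeysD]
    apply List.map_congr_left
    intro k hk
    have hval : D.getD k [] = (ps.filter (fun p => p.1 == k)).map (·.2) := by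
      rw [hD, PySem.Dict.getD_foldl_modify_append]
      simp
    rw [hval, hps, group_lemma f ws k (hkeyne k hk)]
  exact Prod.ext h1 (Prod.ext h2 h3)
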